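-- pv_equiv track=rewrite | github.com/luong-komorebi/Python_examples | Python Program for Product of unique prime factors of a number.py | productPrimeFactors
-- ===== SOURCE A (Python) =====
-- def productPrimeFactors(n):
-- 	product = 1
--
-- 	for i in range(2, n+1):
-- 		if (n % i == 0):
-- 			if isPrime := next(
-- 				(0 for j in range(2, int(i / 2 + 1)) if (i % j == 0)), 1
-- 			):
-- 				product = product * i
--
-- 	return product
-- ===== SOURCE B (Python) =====
-- def productPrimeFactors(n):
--     # Trial division up to sqrt(n): multiply each distinct prime factor once.
--     if n <= 1:
--         return 1
--     product = 1
--     m = n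
--     d = 2
--     while d * d <= m:
--         if m % d == 0:
--             product *= d
--             while m % d == 0:
--                 m //= d
--         d += 1
--     if m > 1:
--         product *= m
--     return product
-- ===== Notes on version B (the rewrite author's own statement) =====
-- stated objective: faster
-- what changed: A tests every candidate up to n for dividing n and for primality by an inner scan up to half the candidate; B factorizes n by trial division up to sqrt(n), multiplying each distinct prime factor once as it is stripped out.
import Mathlib
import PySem

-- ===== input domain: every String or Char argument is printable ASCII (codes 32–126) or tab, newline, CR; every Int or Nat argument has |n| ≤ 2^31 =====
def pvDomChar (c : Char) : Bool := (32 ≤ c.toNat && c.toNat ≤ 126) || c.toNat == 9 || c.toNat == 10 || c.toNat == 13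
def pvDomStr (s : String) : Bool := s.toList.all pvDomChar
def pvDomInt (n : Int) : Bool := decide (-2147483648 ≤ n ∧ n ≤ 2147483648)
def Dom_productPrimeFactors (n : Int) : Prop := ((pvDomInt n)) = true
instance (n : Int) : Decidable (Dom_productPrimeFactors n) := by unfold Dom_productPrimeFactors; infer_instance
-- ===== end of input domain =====

-- B replaces A's quadratic scan (every i ≤ n tested for divisibility and primality)
-- by trial-division factorization up to sqrt(n), multiplying each distinct prime once.

-- ===== PORT A =====
-- Literal port of A.  `int(i / 2 + 1)` is ported as `i // 2 + 1`: exact for every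
-- value the loop reaches (2 ≤ i ≤ 2^31 + 1, where the float arithmetic is exact and
-- truncation of i/2 + 1 agrees with floor division).
def productPrimeFactors (n : Int) : Int :=
  (PySem.List.pyRange 2 (n + 1) 1).foldl
    (fun product i =>
      if PySem.Int.mod n i == 0 then
        let isPrime : Int :=
          if (PySem.List.pyRange 2 (PySem.Int.floordiv i 2 + 1) 1).any
              (fun j => PySem.Int.mod i j == 0) then 0 else 1
        if isPrime != 0 then product * i else product
      else product) 1

-- ===== PORT B =====
-- inner `while m % d == 0: m //= d`  (the guards 2 ≤ d, 0 < m only make the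
-- recursion total; they hold at every call site)
def pvStrip (m d : Nat) : Nat :=
  if h : 2 ≤ d ∧ m % d = 0 ∧ 0 < m then pvStrip (m / d) d else m
termination_by m
decreasing_by exact Nat.div_lt_self h.2.2 (by omega)

theorem pvStrip_le (m d : Nat) : pvStrip m d ≤ m := by
  induction m using pvStrip.induct (d := d) with
  | case1 m h ih =>
    rw [pvStrip, dif_pos h]
    exact le_trans ih (Nat.div_le_self _ _)
  | case2 m h => rw [pvStrip, dif_neg h]

-- outer `while d * d <= m` loop  (the guard 2 ≤ d only makes the recursion total)
def pvLoop (m d product : Nat) : Nat :=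
  if h : d * d ≤ m ∧ 2 ≤ d then
    if m % d = 0 then pvLoop (pvStrip m d) (d + 1) (product * d)
    else pvLoop m (d + 1) product
  else if 1 < m then product * m else product
termination_by m + 1 - d
decreasing_by
  · have h1 := pvStrip_le m d
    have h2 : d < m := by nlinarith [h.1, h.2]
    omega
  · have h2 : d < m := by nlinarith [h.1, h.2]
    omega

def productPrimeFactors_alt (n : Int) : Int :=
  if n ≤ 1 then 1 else (pvLoop n.toNat 2 1 : Nat)

-- ===== PRECONDITION & SPEC =====
def Spec_productPrimeFactors (n : Int) (out : Int) : Prop := out = productPrimeFactors_alt n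
instance (n : Int) (out : Int) : Decidable (Spec_productPrimeFactors n out) := by unfold Spec_productPrimeFactors; infer_instance

-- ===== CLAIM (what is proved, stated in full; the proofs are below) =====
def Claim_equal_productPrimeFactors : Prop := ∀ (n : Int), Dom_productPrimeFactors n → Spec_productPrimeFactors n (productPrimeFactors n)

-- ===== LEMMAS AND PROOFS =====

-- the product of the distinct prime factors: the common reference value
def pvTarget (N : Nat) : Nat := ∏ p ∈ N.primeFactors, p

theorem pvStrip_dvd (m d : Nat) : pvStrip m d ∣ m := by
  induction m using pvStrip.induct (d := d) with
  | case1 m h ih =>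
    rw [pvStrip, dif_pos h]
    exact dvd_trans ih (Nat.div_dvd_of_dvd (Nat.dvd_of_mod_eq_zero h.2.1))
  | case2 m h => rw [pvStrip, dif_neg h]

theorem pvStrip_pos (m d : Nat) (hm : 0 < m) : 0 < pvStrip m d := by
  rcases Nat.eq_zero_or_pos (pvStrip m d) with h | h
  · exact absurd (h ▸ pvStrip_dvd m d) (by simpa using Nat.pos_iff_ne_zero.1 hm)
  · exact h

theorem pvStrip_not_dvd (m d : Nat) (hd : 2 ≤ d) (hm : 0 < m) : ¬ d ∣ pvStrip m d := by
  induction m using pvStrip.induct (d := d) with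
  | case1 m h ih =>
    rw [pvStrip, dif_pos h]
    exact fun hc => ih (Nat.div_pos (Nat.le_of_dvd h.2.2 (Nat.dvd_of_mod_eq_zero h.2.1)) (by omega)) hc
  | case2 m h =>
    rw [pvStrip, dif_neg h]
    intro hc
    exact h ⟨hd, Nat.mod_eq_zero_of_dvd hc, hm⟩

theorem pvStrip_primeFactors (m d : Nat) (hd : d.Prime) (hm : 0 < m) :
    (pvStrip m d).primeFactors = m.primeFactors.erase d := by
  induction m using pvStrip.induct (d := d) with
  | case1 m h ih =>
    rw [pvStrip, dif_pos h]
    have hdvd : d ∣ m := Nat.dvd_of_mod_eq_zero h.2.1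
    have hq : 0 < m / d := Nat.div_pos (Nat.le_of_dvd hm hdvd) (by omega)
    have hmul : m = d * (m / d) := (Nat.mul_div_cancel' hdvd).symm
    rw [ih hq]
    conv_rhs => rw [hmul]
    rw [Nat.primeFactors_mul (by omega) (by omega), hd.primeFactors]
    rw [Finset.singleton_union, Finset.erase_insert_eq_erase]
  | case2 m h =>
    rw [pvStrip, dif_neg h]
    have : ¬ d ∣ m := fun hc => h ⟨hd.two_le, Nat.mod_eq_zero_of_dvd hc, hm⟩
    rw [Finset.erase_eq_of_notMem]
    simp only [Nat.mem_primeFactors, not_and]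
    intro _ hc
    exact absurd hc this

theorem pvLoop_eq (m d product : Nat) (hd : 2 ≤ d) (hm : 0 < m)
    (hfac : ∀ p, p.Prime → p ∣ m → d ≤ p) :
    pvLoop m d product = product * pvTarget m := by
  induction m, d, product using pvLoop.induct with
  | case1 m d product h hmd ih =>
    rw [pvLoop, dif_pos h, if_pos hmd]
    have hdvd : d ∣ m := Nat.dvd_of_mod_eq_zero hmd
    -- d is prime: its least prime factor divides m, hence is ≥ d, hence = d
    have hdp : d.Prime := by
      have h1 : d.minFac ∣ m := dvd_trans (Nat.minFac_dvd d) hdvd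
      have h2 : d.minFac.Prime := Nat.minFac_prime (by omega)
      have h3 : d ≤ d.minFac := hfac _ h2 h1
      have h4 : d.minFac ≤ d := Nat.minFac_le (by omega)
      rw [Nat.prime_def_minFac]
      omega
    have hs_pos : 0 < pvStrip m d := pvStrip_pos m d hm
    have hs_dvd : pvStrip m d ∣ m := pvStrip_dvd m d
    have hfac' : ∀ p, p.Prime → p ∣ pvStrip m d → d + 1 ≤ p := by
      intro p hp hpd
      have h1 : d ≤ p := hfac p hp (dvd_trans hpd hs_dvd)
      have h2 : p ≠ d := by
        rintro rfl
        exact pvStrip_not_dvd m p hp.two_le hm hpd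
      omega
    rw [ih (by omega) hs_pos hfac']
    have hmem : d ∈ m.primeFactors := Nat.mem_primeFactors.2 ⟨hdp, hdvd, by omega⟩
    unfold pvTarget
    rw [pvStrip_primeFactors m d hdp hm, mul_assoc,
      Finset.mul_prod_erase _ (fun x => x) hmem]
  | case2 m d product h hmd ih =>
    rw [pvLoop, dif_pos h, if_neg hmd]
    have hfac' : ∀ p, p.Prime → p ∣ m → d + 1 ≤ p := by
      intro p hp hpd
      have h1 : d ≤ p := hfac p hp hpd
      have h2 : p ≠ d := by
        rintro rfl
        exact hmd (Nat.mod_eq_zero_of_dvd hpd)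
      omega
    exact ih (by omega) hm hfac'
  | case3 m d product h hm1 =>
    rw [pvLoop, dif_neg h, if_pos hm1]
    have hlt : m < d * d := by
      rcases Nat.lt_or_ge m (d * d) with h1 | h1
      · exact h1
      · exact absurd ⟨h1, hd⟩ h
    have hmp : m.Prime := by
      by_contra hnp
      have h1 : m.minFac.Prime := Nat.minFac_prime (by omega)
      have h2 : d ≤ m.minFac := hfac _ h1 (Nat.minFac_dvd m)
      have h3 : m.minFac ^ 2 ≤ m := Nat.minFac_sq_le_self (by omega) hnp
      have h4 : d * d ≤ m.minFac * m.minFac := Nat.mul_le_mul h2 h2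
      nlinarith
    unfold pvTarget
    rw [hmp.primeFactors, Finset.prod_singleton]
  | case4 m d product h hm1 =>
    rw [pvLoop, dif_neg h, if_neg hm1]
    have : m = 1 := by omega
    subst this
    unfold pvTarget
    simp

-- ---- A side ----

-- A's loop condition on i, as one Bool
def pvCondA (n i : Int) : Bool :=
  (PySem.Int.mod n i == 0) &&
    !((PySem.List.pyRange 2 (PySem.Int.floordiv i 2 + 1) 1).any
        (fun j => PySem.Int.mod i j == 0))

theorem pvFoldl_filter (l : List Int) (c : Int → Bool) (a : Int) :
    l.foldl (fun acc i => if c i then acc * i else acc) a = a * (l.filter c).prod := by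
  induction l generalizing a with
  | nil => simp
  | cons x l ih =>
    by_cases hx : c x <;> simp [List.foldl_cons, hx, ih, mul_assoc]

theorem pvA_eq_filter (n : Int) :
    productPrimeFactors n = ((PySem.List.pyRange 2 (n + 1) 1).filter (pvCondA n)).prod := by
  unfold productPrimeFactors
  have hfun : (fun (product i : Int) =>
      if PySem.Int.mod n i == 0 then
        let isPrime : Int :=
          if (PySem.List.pyRange 2 (PySem.Int.floordiv i 2 + 1) 1).any
              (fun j => PySem.Int.mod i j == 0) then 0 else 1
        if isPrime != 0 then product * i else product
      else product) =
      (fun acc i => if pvCondA n i then acc * i else acc) := by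
    funext acc i
    unfold pvCondA
    by_cases h1 : PySem.Int.mod n i == 0 <;>
      by_cases h2 : (PySem.List.pyRange 2 (PySem.Int.floordiv i 2 + 1) 1).any
        (fun j => PySem.Int.mod i j == 0) <;>
      simp [h1]
  rw [hfun, pvFoldl_filter]
  ring

-- inner scan of A decides compositeness, for 2 ≤ i
theorem pvInner_iff (i : Int) (hi : 2 ≤ i) :
    ((PySem.List.pyRange 2 (PySem.Int.floordiv i 2 + 1) 1).any
        (fun j => PySem.Int.mod i j == 0)) = true ↔ ¬ i.toNat.Prime := by
  have hip : i = (i.toNat : Int) := by omega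
  have hp2 : 2 ≤ i.toNat := by omega
  have hfd : PySem.Int.floordiv i 2 = ((i.toNat / 2 : Nat) : Int) := by
    rw [hip]; exact_mod_cast PySem.Int.floordiv_natCast i.toNat 2
  rw [List.any_eq_true]
  constructor
  · rintro ⟨j, hjmem, hj⟩
    rw [PySem.List.mem_pyRange_one, hfd] at hjmem
    have hdvd : j ∣ i := (PySem.Int.mod_eq_zero_iff_dvd i j).1 (by simpa using hj)
    have hjq : j = (j.toNat : Int) := by omega
    intro hprime
    have hqd : j.toNat ∣ i.toNat := by
      have := hdvd
      rw [hip, hjq] at this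
      exact_mod_cast this
    have hor : j.toNat = 1 ∨ j.toNat = i.toNat := hprime.eq_one_or_self_of_dvd _ hqd
    have hlt : i.toNat / 2 < i.toNat := Nat.div_lt_self (by omega) (by omega)
    have h1 : (2:Int) ≤ j := hjmem.1
    have h2 : j ≤ ((i.toNat / 2 : Nat) : Int) := by omega
    omega
  · intro hnp
    obtain ⟨q, hqd, hq2, hqlt⟩ := Nat.exists_dvd_of_not_prime2 hp2 hnp
    have hk : q * 2 ≤ i.toNat := by
      obtain ⟨k, hk⟩ := hqd
      have hk0 : k ≠ 0 := by rintro rfl; simp at hk; omega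
      have hk1 : k ≠ 1 := by rintro rfl; simp at hk; omega
      calc q * 2 ≤ q * k := Nat.mul_le_mul_left q (by omega)
        _ = i.toNat := hk.symm
    have hqle : q ≤ i.toNat / 2 := (Nat.le_div_iff_mul_le (by omega)).2 hk
    refine ⟨(q : Int), ?_, ?_⟩
    · rw [PySem.List.mem_pyRange_one, hfd]
      have : (q : Int) ≤ ((i.toNat / 2 : Nat) : Int) := by exact_mod_cast hqle
      constructor
      · exact_mod_cast hq2
      · omega
    · simp only [beq_iff_eq]
      rw [PySem.Int.mod_eq_zero_iff_dvd, hip]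
      exact_mod_cast hqd

-- the filter condition picks out exactly the prime divisors of n, for list members
theorem pvCondA_iff (n i : Int) (_hn : 2 ≤ n) (hi : 2 ≤ i) :
    pvCondA n i = true ↔ i ∣ n ∧ i.toNat.Prime := by
  unfold pvCondA
  rw [Bool.and_eq_true, Bool.not_eq_true', beq_iff_eq, PySem.Int.mod_eq_zero_iff_dvd]
  have h := pvInner_iff i hi
  apply and_congr Iff.rfl
  rw [Bool.eq_false_iff]
  constructor
  · intro hne
    by_contra hnp
    exact hne (h.2 hnp)
  · intro hp hc
    exact h.1 hc hp

theorem pvA_filter_perm (n : Int) (hn : 2 ≤ n) :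
    ((PySem.List.pyRange 2 (n + 1) 1).filter (pvCondA n)).Perm
      (n.toNat.primeFactors.toList.map (Nat.cast : Nat → Int)) := by
  have hnn : n = (n.toNat : Int) := by omega
  refine (List.perm_ext_iff_of_nodup ?_ ?_).2 ?_
  · exact (PySem.List.nodup_pyRange_one 2 (n + 1)).filter _
  · exact (Finset.nodup_toList _).map (fun a b hab => by exact_mod_cast hab)
  · intro x
    rw [List.mem_filter, PySem.List.mem_pyRange_one, List.mem_map]
    constructor
    · rintro ⟨⟨hx2, hxn⟩, hc⟩
      obtain ⟨hdvd, hprime⟩ := (pvCondA_iff n x hn hx2).1 hc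
      refine ⟨x.toNat, Finset.mem_toList.2 (Nat.mem_primeFactors.2 ⟨hprime, ?_, by omega⟩), by omega⟩
      have hx : x = (x.toNat : Int) := by omega
      rw [hx, hnn] at hdvd
      exact_mod_cast hdvd
    · rintro ⟨p, hp, rfl⟩
      rw [Finset.mem_toList, Nat.mem_primeFactors] at hp
      have hp2 : 2 ≤ p := hp.1.two_le
      have hple : p ≤ n.toNat := Nat.le_of_dvd (by omega) hp.2.1
      have hpi : (2:Int) ≤ (p : Int) := by exact_mod_cast hp2
      refine ⟨⟨hpi, by omega⟩, (pvCondA_iff n _ hn hpi).2 ⟨?_, ?_⟩⟩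
      · rw [hnn]
        exact_mod_cast hp.2.1
      · simpa using hp.1

theorem pvA_eq_target (n : Int) (hn : 2 ≤ n) :
    productPrimeFactors n = (pvTarget n.toNat : Nat) := by
  rw [pvA_eq_filter, (pvA_filter_perm n hn).prod_eq, ← Nat.cast_list_prod]
  unfold pvTarget
  rw [Finset.prod_toList]

-- ===== VERDICT (by name: the statement is the Claim_ definition above) =====
theorem productPrimeFactors_spec : Claim_equal_productPrimeFactors := by
  intro n _
  unfold Spec_productPrimeFactors productPrimeFactors_alt
  by_cases hn : n ≤ 1
  · rw [if_pos hn]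
    unfold productPrimeFactors
    rw [PySem.List.pyRange_one_eq_nil (by omega)]
    rfl
  · rw [if_neg hn]
    rw [pvA_eq_target n (by omega), pvLoop_eq n.toNat 2 1 le_rfl (by omega)
      (fun p hp _ => hp.two_le), one_mul]
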